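-- pv_equiv track=rewrite | github.com/avijitmondal/export-1password | main.py | _parse_login_fields
-- ===== SOURCE A (Python) =====
-- from typing import Dict, List, Optional, Any
--
-- def _parse_login_fields(login_fields: List[Dict]) -> tuple[Optional[str], Optional[str]]:
--     """Parse login fields to extract username and password."""
--     username = None
--     password = None
--
--     for field in login_fields:
--         if not isinstance(field, dict) or 'name' not in field or 'value' not in field:
--             continue
--
--         field_name = field['name'].lower()
--         if field_name == 'username':
--             username = field['value']
--         elif field_name == 'password':
--             password = field['value']
--
--     return username, password
-- ===== SOURCE B (Python) =====
-- def _parse_login_fields(login_fields):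
--     """Parse login fields to extract username and password."""
--     def find_last(key):
--         # last occurrence wins == first match scanning backwards; stop as soon as found
--         for f in reversed(login_fields):
--             if isinstance(f, dict) and 'name' in f and 'value' in f and f['name'].lower() == key:
--                 return f['value']
--         return None
--     return find_last('username'), find_last('password')
-- ===== Notes on version B (the rewrite author's own statement) =====
-- stated objective: alternative
-- what changed: Replaces A's single forward pass that mutates two tracked result variables with two independent backward searches with early exit: last-occurrence-wins becomes first-match-in-reverse, so no state is carried at all.
import Mathlib
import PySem

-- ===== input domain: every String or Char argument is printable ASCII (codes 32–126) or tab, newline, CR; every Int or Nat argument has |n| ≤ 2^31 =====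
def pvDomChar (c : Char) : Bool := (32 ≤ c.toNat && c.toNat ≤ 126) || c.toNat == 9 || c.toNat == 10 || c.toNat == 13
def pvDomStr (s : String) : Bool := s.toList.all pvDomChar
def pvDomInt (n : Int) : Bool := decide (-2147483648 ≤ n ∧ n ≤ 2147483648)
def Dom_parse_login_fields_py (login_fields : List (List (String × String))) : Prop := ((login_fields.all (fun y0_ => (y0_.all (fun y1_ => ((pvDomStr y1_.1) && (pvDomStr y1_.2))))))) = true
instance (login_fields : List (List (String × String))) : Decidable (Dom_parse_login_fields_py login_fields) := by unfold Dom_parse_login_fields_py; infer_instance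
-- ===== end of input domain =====

-- B replaces A's forward pass with two mutated result variables by two independent
-- backward early-exit searches (last occurrence = first match in reverse); objective: alternative.

-- ===== PORT A =====
-- A's loop body: update (username, password) state from one field
def pvStepA (st : Option String × Option String) (field : List (String × String)) :
    Option String × Option String :=
  match (PySem.Dict.mk field).get? "name", (PySem.Dict.mk field).get? "value" with
  | some n, some v =>
      let field_name := PySem.Str.lower n
      if field_name = "username" then (some v, st.2)
      else if field_name = "password" then (st.1, some v)
      else st
  | _, _ => st

def parse_login_fields_py (login_fields : List (List (String × String))) : Option String × Option String :=
  login_fields.foldl pvStepA (none, none)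

-- ===== PORT B =====
-- B's inner loop: first field (in the given order) whose lowercased name is `key`; early exit
def pvFindLast (key : String) : List (List (String × String)) → Option String
  | [] => none
  | f :: rest =>
      match (PySem.Dict.mk f).get? "name", (PySem.Dict.mk f).get? "value" with
      | some n, some v =>
          if PySem.Str.lower n = key then some v else pvFindLast key rest
      | _, _ => pvFindLast key rest

def parse_login_fields_py_alt (login_fields : List (List (String × String))) : Option String × Option String :=
  (pvFindLast "username" login_fields.reverse, pvFindLast "password" login_fields.reverse)

-- ===== PRECONDITION & SPEC =====
def Spec_parse_login_fields_py (login_fields : List (List (String × String))) (out : Option String × Option String) : Prop := out = parse_login_fields_py_alt login_fields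
instance (login_fields : List (List (String × String))) (out : Option String × Option String) : Decidable (Spec_parse_login_fields_py login_fields out) := by unfold Spec_parse_login_fields_py; infer_instance

-- ===== CLAIM (what is proved, stated in full; the proofs are below) =====
def Claim_equal_parse_login_fields_py : Prop := ∀ (login_fields : List (List (String × String))), Dom_parse_login_fields_py login_fields → Spec_parse_login_fields_py login_fields (parse_login_fields_py login_fields)

-- ===== LEMMAS AND PROOFS =====

theorem pvFindLast_append (key : String) (l m : List (List (String × String))) :
    pvFindLast key (l ++ m) = (pvFindLast key l).or (pvFindLast key m) := by
  induction l with
  | nil => simp [pvFindLast]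
  | cons f rest ih =>
      simp only [List.cons_append, pvFindLast]
      cases (PySem.Dict.mk f).get? "name" with
      | none => exact ih
      | some n =>
          cases (PySem.Dict.mk f).get? "value" with
          | none => exact ih
          | some v =>
              by_cases h : PySem.Str.lower n = key
              · simp [h]
              · simp [h, ih]

-- invariant: A's fold from state st equals B's backward searches, falling back to st
theorem pv_loop_eq (lfs : List (List (String × String))) (st : Option String × Option String) :
    lfs.foldl pvStepA st =
      ((pvFindLast "username" lfs.reverse).or st.1, (pvFindLast "password" lfs.reverse).or st.2) := by
  induction lfs generalizing st with
  | nil => simp [pvFindLast]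
  | cons f rest ih =>
      simp only [List.foldl_cons, List.reverse_cons, pvFindLast_append]
      rw [ih]
      have hsingle : ∀ key, pvFindLast key [f] =
          (match (PySem.Dict.mk f).get? "name", (PySem.Dict.mk f).get? "value" with
           | some n, some v => if PySem.Str.lower n = key then some v else none
           | _, _ => none) := by
        intro key
        cases hn : (PySem.Dict.mk f).get? "name" <;>
          cases hv : (PySem.Dict.mk f).get? "value" <;> simp [pvFindLast, hn, hv]
      have hstep1 : (pvStepA st f).1 = (pvFindLast "username" [f]).or st.1 := by
        rw [hsingle]
        unfold pvStepA
        cases (PySem.Dict.mk f).get? "name" with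
        | none => rfl
        | some n =>
            cases (PySem.Dict.mk f).get? "value" with
            | none => rfl
            | some v =>
                by_cases h1 : PySem.Str.lower n = "username"
                · simp [h1]
                · by_cases h2 : PySem.Str.lower n = "password" <;> simp [h1, h2]
      have hstep2 : (pvStepA st f).2 = (pvFindLast "password" [f]).or st.2 := by
        rw [hsingle]
        unfold pvStepA
        cases (PySem.Dict.mk f).get? "name" with
        | none => rfl
        | some n =>
            cases (PySem.Dict.mk f).get? "value" with
            | none => rfl
            | some v =>
                by_cases h2 : PySem.Str.lower n = "password"
                · by_cases h1 : PySem.Str.lower n = "username" <;> simp [h1, h2]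
                · by_cases h1 : PySem.Str.lower n = "username" <;> simp [h1, h2]
      rw [hstep1, hstep2, Option.or_assoc, Option.or_assoc]

-- ===== VERDICT (by name: the statement is the Claim_ definition above) =====
theorem parse_login_fields_py_spec : Claim_equal_parse_login_fields_py := by
  intro lfs _
  unfold Spec_parse_login_fields_py parse_login_fields_py parse_login_fields_py_alt
  simpa using pv_loop_eq lfs (none, none)
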